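-- pv_equiv track=rewrite | github.com/pypi-data/pypi-mirror-403 | packages/moogli-erp/moogli_erp-2026.1.3.tar.gz/moogli_erp-2026.1.3/caerp/views/management/kms.py | compute_aggregate_data
-- ===== SOURCE A (Python) =====
-- def compute_aggregate_data(kms_data):
--     """
--     Calcule les totaux à partir des données des utilisateurs
--     """
--     kms_list = []
--     aggregate_data = []
--     for user_id, user_kms_data in kms_data.items():
--         kms_list.append(user_kms_data)
--     for month_data in zip(*kms_list):
--         month_kms = 0
--         month_amount = 0
--         for nb_kms, amount, rate in month_data:
--             month_kms += nb_kms
--             month_amount += amount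
--         aggregate_data.append((month_kms, month_amount))
--     return aggregate_data
-- ===== SOURCE B (Python) =====
-- def compute_aggregate_data(kms_data):
--     """
--     Calcule les totaux à partir des données des utilisateurs
--     """
--     values = list(kms_data.values())
--     if not values:
--         return []
--     n = min(len(v) for v in values)
--     acc = [(0, 0)] * n
--     for v in values:
--         acc = [(k + nb, a + amount) for (k, a), (nb, amount, _rate) in zip(acc, v)]
--     return acc
-- ===== Notes on version B (the rewrite author's own statement) =====
-- stated objective: alternative
-- what changed: Replaces the transpose-with-zip(*rows) then per-month summation by a single pass over the user rows that folds each row into a fixed-size per-month accumulator (sized to the shortest row).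
import Mathlib
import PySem

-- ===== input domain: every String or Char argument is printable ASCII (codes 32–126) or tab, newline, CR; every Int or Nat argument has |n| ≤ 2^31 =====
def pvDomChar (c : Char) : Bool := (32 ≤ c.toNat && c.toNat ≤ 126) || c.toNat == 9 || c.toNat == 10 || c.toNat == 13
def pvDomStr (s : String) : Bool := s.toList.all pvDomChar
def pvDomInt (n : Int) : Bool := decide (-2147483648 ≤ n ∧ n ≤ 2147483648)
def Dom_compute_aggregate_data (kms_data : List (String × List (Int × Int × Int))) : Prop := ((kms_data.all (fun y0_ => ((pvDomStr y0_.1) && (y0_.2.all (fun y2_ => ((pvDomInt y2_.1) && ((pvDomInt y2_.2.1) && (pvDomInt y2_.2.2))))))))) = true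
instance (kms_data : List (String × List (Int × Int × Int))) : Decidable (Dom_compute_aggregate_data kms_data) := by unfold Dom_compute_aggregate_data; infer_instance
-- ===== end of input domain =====

-- B replaces A's zip(*rows) transposition + per-month inner summation by a single
-- fold over the user rows into a per-month accumulator sized to the shortest row
-- (objective: alternative decomposition, same asymptotic cost).

-- ===== PORT A =====
-- port of Python's zip(*ls): rows of heads until some list (or the list of lists) is exhausted
def pyZip (ls : List (List (Int × Int × Int))) : List (List (Int × Int × Int)) :=
  if h : ls.isEmpty ∨ ls.any (·.isEmpty) then []
  else (ls.map (·.headI)) :: pyZip (ls.map List.tail)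
termination_by ls.headI.length
decreasing_by
  simp only [not_or, List.isEmpty_iff, List.any_eq_true, not_exists] at h
  obtain ⟨h1, h2⟩ := h
  match ls with
  | [] => exact absurd rfl h1
  | v :: vs =>
    have hv : ¬ v.isEmpty = true := by
      have := h2 v; simp at this; simpa [List.isEmpty_iff] using this
    simp only [List.headI]
    cases v with
    | nil => simp at hv
    | cons a t => simp [List.tail]

def compute_aggregate_data (kms_data : List (String × List (Int × Int × Int))) : List (Int × Int) :=
  let kms_list := kms_data.foldl (fun l p => l ++ [p.2]) []
  (pyZip kms_list).foldl
    (fun agg month =>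
      agg ++ [month.foldl (fun s t => (s.1 + t.1, s.2 + t.2.1)) ((0 : Int), (0 : Int))]) []

-- ===== PORT B =====
def compute_aggregate_data_alt (kms_data : List (String × List (Int × Int × Int))) : List (Int × Int) :=
  let values := kms_data.map (·.2)
  if values.isEmpty then []
  else
    let n := ((values.map List.length).min?).getD 0
    values.foldl
      (fun acc v => List.zipWith (fun p t => (p.1 + t.1, p.2 + t.2.1)) acc v)
      (List.replicate n ((0 : Int), (0 : Int)))

-- ===== PRECONDITION & SPEC =====
def Spec_compute_aggregate_data (kms_data : List (String × List (Int × Int × Int))) (out : List (Int × Int)) : Prop := out = compute_aggregate_data_alt kms_data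
instance (kms_data : List (String × List (Int × Int × Int))) (out : List (Int × Int)) : Decidable (Spec_compute_aggregate_data kms_data out) := by unfold Spec_compute_aggregate_data; infer_instance

-- ===== CLAIM (what is proved, stated in full; the proofs are below) =====
def Claim_equal_compute_aggregate_data : Prop := ∀ (kms_data : List (String × List (Int × Int × Int))), Dom_compute_aggregate_data kms_data → Spec_compute_aggregate_data kms_data (compute_aggregate_data kms_data)

-- ===== LEMMAS AND PROOFS =====

-- appending singletons in a foldl is mapping
theorem pv_foldl_push {α β : Type} (f : α → β) :
    ∀ (xs : List α) (init : List β),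
      xs.foldl (fun l x => l ++ [f x]) init = init ++ xs.map f := by
  intro xs
  induction xs with
  | nil => simp
  | cons x xs ih => intro init; simp [List.foldl_cons, ih]

theorem pv_foldl_zipWith_nil :
    ∀ (rows : List (List (Int × Int × Int))),
      rows.foldl (fun acc v => List.zipWith (fun p t => (p.1 + t.1, p.2 + t.2.1)) acc v) [] = [] := by
  intro rows
  induction rows with
  | nil => rfl
  | cons v vs ih => simp [List.foldl_cons, ih]

theorem pv_decomp :
    ∀ (rows : List (List (Int × Int × Int))) (x : Int × Int) (acc : List (Int × Int)),
      (∀ v ∈ rows, v ≠ []) →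
      rows.foldl (fun a v => List.zipWith (fun p t => (p.1 + t.1, p.2 + t.2.1)) a v) (x :: acc)
        = (rows.foldl (fun s v => (s.1 + v.headI.1, s.2 + v.headI.2.1)) x)
          :: (rows.map List.tail).foldl
              (fun a v => List.zipWith (fun p t => (p.1 + t.1, p.2 + t.2.1)) a v) acc := by
  intro rows
  induction rows with
  | nil => intro x acc _; rfl
  | cons v vs ih =>
    intro x acc hne
    have hv : v ≠ [] := hne v (by simp)
    match v with
    | [] => exact absurd rfl hv
    | h :: t =>
      simp only [List.foldl_cons, List.zipWith_cons_cons, List.map_cons, List.headI, List.tail]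
      exact ih _ _ (fun w hw => hne w (by simp [hw]))

-- facts about foldl min on Nat
theorem pv_min_cons (a : Nat) (l : List Nat) :
    ((a :: l : List Nat).min?).getD 0 = l.foldl min a := rfl

theorem pv_foldl_min_le_init :
    ∀ (l : List Nat) (a : Nat), l.foldl min a ≤ a := by
  intro l
  induction l with
  | nil => intro a; simp
  | cons b l ih =>
    intro a
    simp only [List.foldl_cons]
    exact (ih (min a b)).trans (by omega)

theorem pv_foldl_min_le_mem :
    ∀ (l : List Nat) (a x : Nat), x ∈ l → l.foldl min a ≤ x := by
  intro l
  induction l with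
  | nil => intro a x hx; simp at hx
  | cons b l ih =>
    intro a x hx
    simp only [List.foldl_cons]
    rcases List.mem_cons.mp hx with h | h
    · subst h
      exact (pv_foldl_min_le_init l (min a x)).trans (by omega)
    · exact ih _ _ h

theorem pv_foldl_min_mem :
    ∀ (l : List Nat) (a : Nat), l.foldl min a = a ∨ l.foldl min a ∈ l := by
  intro l
  induction l with
  | nil => intro a; simp
  | cons b l ih =>
    intro a
    simp only [List.foldl_cons]
    rcases ih (min a b) with h | h
    · rcases Nat.le_total a b with hab | hab
      · left; rw [h]; omega
      · right; rw [h]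
        have : min a b = b := by omega
        rw [this]; exact List.mem_cons_self
    · right; exact List.mem_cons_of_mem _ h

theorem pv_foldl_min_sub_one :
    ∀ (l : List Nat) (a : Nat),
      (l.map (fun x => x - 1)).foldl min (a - 1) = l.foldl min a - 1 := by
  intro l
  induction l with
  | nil => intro a; rfl
  | cons b l ih =>
    intro a
    simp only [List.map_cons, List.foldl_cons]
    have : min (a - 1) (b - 1) = min a b - 1 := by omega
    rw [this, ih]

-- min length of the tails, when every row is nonempty enough
theorem pv_min_tail (rows : List (List (Int × Int × Int))) (r : List (Int × Int × Int))
    (rs : List (List (Int × Int × Int))) (h : rows = r :: rs) :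
    (((rows.map List.tail).map List.length).min?).getD 0
      = ((rows.map List.length).min?).getD 0 - 1 := by
  subst h
  have hlen : ∀ (v : List (Int × Int × Int)), v.tail.length = v.length - 1 := by
    intro v; cases v <;> simp
  simp only [List.map_cons, pv_min_cons, hlen]
  have : (rs.map List.tail).map List.length = (rs.map List.length).map (fun x => x - 1) := by
    simp only [List.map_map]; congr 1; funext v; exact hlen v
  rw [this, pv_foldl_min_sub_one]

-- the core equivalence: transposing then summing = folding rows into the accumulator
theorem pv_main :
    ∀ (n : Nat) (rows : List (List (Int × Int × Int))), rows ≠ [] →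
      ((rows.map List.length).min?).getD 0 = n →
      (pyZip rows).foldl
          (fun agg month =>
            agg ++ [month.foldl (fun s t => (s.1 + t.1, s.2 + t.2.1)) ((0 : Int), (0 : Int))]) []
        = rows.foldl (fun acc v => List.zipWith (fun p t => (p.1 + t.1, p.2 + t.2.1)) acc v)
            (List.replicate n ((0 : Int), (0 : Int))) := by
  intro n
  induction n with
  | zero =>
    intro rows hne hmin
    match rows with
    | r :: rs =>
      have hmin' : (rs.map List.length).foldl min r.length = 0 := by
        have := hmin
        simp only [List.map_cons, pv_min_cons] at this
        exact this
      have hattain := pv_foldl_min_mem (rs.map List.length) r.length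
      have hzip : pyZip (r :: rs) = [] := by
        rw [pyZip]
        have : ((r :: rs).any (·.isEmpty)) = true := by
          rcases hattain with h | h
          · rw [hmin'] at h
            simp only [List.any_eq_true]
            exact ⟨r, by simp, List.isEmpty_iff.mpr (List.length_eq_zero_iff.mp h.symm)⟩
          · rw [hmin'] at h
            simp only [List.mem_map] at h
            obtain ⟨v, hv, hv0⟩ := h
            simp only [List.any_eq_true]
            exact ⟨v, List.mem_cons_of_mem _ hv, List.isEmpty_iff.mpr (List.length_eq_zero_iff.mp hv0)⟩
        simp [this]
      rw [hzip]
      simp only [List.replicate, List.foldl_nil]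
      exact (pv_foldl_zipWith_nil (r :: rs)).symm
  | succ n ih =>
    intro rows hne hmin
    match rows with
    | r :: rs =>
      -- every row is nonempty
      have hge : ∀ v ∈ r :: rs, v ≠ [] := by
        intro v hv
        have hle : ((r :: rs).map List.length).min?.getD 0 ≤ v.length := by
          simp only [List.map_cons, pv_min_cons]
          rcases List.mem_cons.mp hv with h | h
          · subst h; exact pv_foldl_min_le_init _ _
          · exact pv_foldl_min_le_mem _ _ _ (List.mem_map_of_mem h)
        rw [hmin] at hle
        intro hnil
        rw [hnil] at hle
        simp at hle
      have hzip : pyZip (r :: rs)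
          = ((r :: rs).map (·.headI)) :: pyZip ((r :: rs).map List.tail) := by
        rw [pyZip]
        have hany : ((r :: rs).any (·.isEmpty)) = false := by
          simp only [List.any_eq_false]
          intro v hv
          simpa [List.isEmpty_iff] using hge v hv
        simp [hany]
      have hhead : ((r :: rs).map (·.headI)).foldl
            (fun s t => (s.1 + t.1, s.2 + t.2.1)) ((0 : Int), (0 : Int))
          = (r :: rs).foldl (fun s v => (s.1 + v.headI.1, s.2 + v.headI.2.1)) ((0 : Int), (0 : Int)) := by
        rw [List.foldl_map]
      have htails_ne : (r :: rs).map List.tail ≠ [] := by simp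
      have htails_min : (((r :: rs).map List.tail).map List.length).min?.getD 0 = n := by
        rw [pv_min_tail (r :: rs) r rs rfl, hmin]
        omega
      have ihres := ih ((r :: rs).map List.tail) htails_ne htails_min
      have push := pv_foldl_push (fun month : List (Int × Int × Int) =>
          month.foldl (fun s t => (s.1 + t.1, s.2 + t.2.1)) ((0 : Int), (0 : Int)))
      have hrep : List.replicate (n + 1) ((0 : Int), (0 : Int))
          = ((0 : Int), (0 : Int)) :: List.replicate n ((0 : Int), (0 : Int)) := rfl
      rw [hzip, hrep, pv_decomp (r :: rs) _ _ hge, push]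
      rw [push] at ihres
      simp only [List.nil_append] at ihres ⊢
      simp only [List.map_cons] at ihres hhead ⊢
      rw [ihres, hhead]

-- ===== VERDICT (by name: the statement is the Claim_ definition above) =====
theorem compute_aggregate_data_spec : Claim_equal_compute_aggregate_data := by
  intro kms_data _
  unfold Spec_compute_aggregate_data compute_aggregate_data compute_aggregate_data_alt
  have hlist : kms_data.foldl (fun l p => l ++ [p.2]) [] = kms_data.map (·.2) := by
    simpa using pv_foldl_push (fun p : String × List (Int × Int × Int) => p.2) kms_data []
  rw [hlist]
  cases kms_data with
  | nil =>
    simp [pyZip]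
  | cons p ps =>
    have hne : (p :: ps).map (·.2) ≠ [] := by simp
    simp only [List.isEmpty_iff, if_neg hne]
    exact pv_main _ ((p :: ps).map (·.2)) hne rfl
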